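-- pv_equiv track=rewrite | github.com/danieljf24/hybrid_space | util/metrics.py | get_gt
-- ===== SOURCE A (Python) =====
-- def get_gt(video_ids, caption_ids):
--     v2t_gt = []
--     for vid_id in video_ids:
--         v2t_gt.append([])
--         for i, cap_id in enumerate(caption_ids):
--             if cap_id.split('#', 1)[0] == vid_id:
--                 v2t_gt[-1].append(i)
--
--     t2v_gt = {}
--     for i, t_gts in enumerate(v2t_gt):
--         for t_gt in t_gts:
--             t2v_gt.setdefault(t_gt, [])
--             t2v_gt[t_gt].append(i)
--
--     return v2t_gt, t2v_gt
-- ===== SOURCE B (Python) =====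
-- def get_gt(video_ids, caption_ids):
--     # group video indices by id, and caption indices by id-prefix, in one pass each
--     index = {}
--     for v, vid in enumerate(video_ids):
--         index.setdefault(vid, []).append(v)
--     cap_index = {}
--     for t, cap in enumerate(caption_ids):
--         cap_index.setdefault(cap.split('#', 1)[0], []).append(t)
--     v2t_gt = [list(cap_index.get(vid, [])) for vid in video_ids]
--     t2v_gt = {t: vs for vid, vs in index.items() for t in cap_index.get(vid, [])}
--     return v2t_gt, t2v_gt
-- ===== Notes on version B (the rewrite author's own statement) =====
-- stated objective: faster
-- what changed: Replaces A's nested scan of all captions per video (and the second nested pass over rows) by two single-pass group-by dicts (video-id -> video indices, caption prefix -> caption indices); v2t rows are then dictionary lookups and t2v is a comprehension over the grouped ids, removing every inner scan.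
import Mathlib
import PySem

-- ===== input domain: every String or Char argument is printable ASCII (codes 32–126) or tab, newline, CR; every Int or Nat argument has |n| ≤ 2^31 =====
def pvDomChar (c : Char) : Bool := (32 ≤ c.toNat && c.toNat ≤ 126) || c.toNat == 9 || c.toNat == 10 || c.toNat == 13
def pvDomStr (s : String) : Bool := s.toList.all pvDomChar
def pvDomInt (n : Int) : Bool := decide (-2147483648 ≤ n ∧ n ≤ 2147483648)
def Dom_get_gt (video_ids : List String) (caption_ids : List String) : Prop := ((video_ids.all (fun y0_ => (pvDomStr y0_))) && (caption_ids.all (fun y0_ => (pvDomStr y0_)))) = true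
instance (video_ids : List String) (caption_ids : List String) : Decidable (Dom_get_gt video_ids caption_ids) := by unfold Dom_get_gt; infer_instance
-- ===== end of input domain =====

-- B replaces A's quadratic nested scans by two one-pass group-by dicts (objective: faster, O(V+C) vs O(V*C)).

-- ===== PORT A =====
-- cap_id.split('#', 1)[0]  (shared by both ports; the split list is never empty, so [0] never raises)
def pvPrefix (c : String) : String := ((PySem.Str.splitMax? c "#" 1).getD []).headD ""

def get_gt (video_ids : List String) (caption_ids : List String) : List (List Int) × (List (Int × List Int)) :=
  -- v2t_gt: for each video append a fresh row, filled by scanning all captions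
  let v2t_gt : List (List Int) := video_ids.foldl (fun v2t vid =>
    v2t ++ [(PySem.List.enumerate caption_ids).foldl
      (fun row p => if pvPrefix p.2 == vid then row ++ [p.1] else row) []]) []
  -- t2v_gt: setdefault + append over the rows
  let t2v_gt : PySem.Dict Int (List Int) := (PySem.List.enumerate v2t_gt).foldl
    (fun d q => q.2.foldl (fun d t => (PySem.Dict.setdefault d t []).modify t [] (fun l => l ++ [q.1])) d)
    PySem.Dict.empty
  (v2t_gt, t2v_gt.items)

-- ===== PORT B =====
def get_gt_alt (video_ids : List String) (caption_ids : List String) : List (List Int) × (List (Int × List Int)) :=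
  -- index: video id -> video indices;  cap_index: caption prefix -> caption indices
  let index : PySem.Dict String (List Int) := (PySem.List.enumerate video_ids).foldl
    (fun d q => (PySem.Dict.setdefault d q.2 []).modify q.2 [] (fun l => l ++ [q.1])) PySem.Dict.empty
  let cap_index : PySem.Dict String (List Int) := (PySem.List.enumerate caption_ids).foldl
    (fun d q => (PySem.Dict.setdefault d (pvPrefix q.2) []).modify (pvPrefix q.2) [] (fun l => l ++ [q.1])) PySem.Dict.empty
  let v2t_gt : List (List Int) := video_ids.map (fun vid => cap_index.getD vid [])
  let t2v_gt : PySem.Dict Int (List Int) := index.items.foldl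
    (fun d kv => (cap_index.getD kv.1 []).foldl (fun d t => d.insert t kv.2) d) PySem.Dict.empty
  (v2t_gt, t2v_gt.items)

-- ===== PRECONDITION & SPEC =====
def Spec_get_gt (video_ids : List String) (caption_ids : List String) (out : List (List Int) × (List (Int × List Int))) : Prop := out = get_gt_alt video_ids caption_ids
instance (video_ids : List String) (caption_ids : List String) (out : List (List Int) × (List (Int × List Int))) : Decidable (Spec_get_gt video_ids caption_ids out) := by unfold Spec_get_gt; infer_instance

-- ===== CLAIM (what is proved, stated in full; the proofs are below) =====
def Claim_equal_get_gt : Prop := ∀ (video_ids : List String) (caption_ids : List String), Dom_get_gt video_ids caption_ids → Spec_get_gt video_ids caption_ids (get_gt video_ids caption_ids)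

-- ===== LEMMAS AND PROOFS =====

-- caption indices whose prefix is k, in order
def pvRow (C : List String) (k : String) : List Int :=
  ((PySem.List.enumerate C).filter (fun p => pvPrefix p.2 == k)).map (·.1)
-- video indices whose id is k, in order
def pvCol (V : List String) (k : String) : List Int :=
  ((PySem.List.enumerate V).filter (fun q => q.2 == k)).map (·.1)

-- setdefault k []; then d[k] = f(d.get(k, []))  is a plain "insert k (f (d.get(k,[])))"
theorem pv_find?_none {κ ν : Type} [BEq κ] (d : PySem.Dict κ ν) (k : κ) (h : d.contains k = false) :
    d.items.find? (fun p => p.1 == k) = none := by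
  rw [List.find?_eq_none]
  intro p hp
  simp only [PySem.Dict.contains, List.any_eq_false] at h
  exact h p hp

theorem pv_setdefault_modify {κ ν : Type} [BEq κ] [LawfulBEq κ] (d : PySem.Dict κ ν) (k : κ) (v0 : ν) (f : ν → ν) :
    (PySem.Dict.setdefault d k v0).modify k v0 f = d.insert k (f (d.getD k v0)) := by
  by_cases h : d.contains k = true
  · simp [PySem.Dict.setdefault, h, PySem.Dict.modify]
  · rw [Bool.not_eq_true] at h
    have hany : (d.items.any fun p => p.1 == k) = false := h
    have hf := pv_find?_none d k h
    have hmap : List.map (fun p => if p.1 == k then (k, f v0) else p) d.items = d.items := by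
      rw [List.map_congr_left (g := id), List.map_id]
      intro p hp
      have hpk : (p.1 == k) = false := by
        have := List.any_eq_false.mp hany p hp
        simpa using this
      simp [hpk]
    simp only [PySem.Dict.setdefault, PySem.Dict.contains, hany, Bool.false_eq_true, if_false,
      PySem.Dict.modify, PySem.Dict.insert, PySem.Dict.getD, PySem.Dict.get?, PySem.Dict.items,
      List.any_append, List.find?_append, hf, List.any_cons, List.any_nil,
      BEq.rfl, Bool.true_or, Bool.false_or, Bool.or_false,
      Option.none_or, Option.map_some, Option.map_none, Option.getD_some, Option.getD_none, if_true]
    have h1 : List.find? (fun p => p.1 == k) [(k, v0)] = some (k, v0) := by simp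
    rw [h1]
    simp only [Option.map_some, Option.getD_some, List.map_append, List.map_cons, List.map_nil,
      BEq.rfl, if_true, hmap]

theorem pv_find?_graph (ks : List String) (F : String → List Int) (kx : String) :
    (ks.map (fun k => (k, F k))).find? (fun p => p.1 == kx)
      = if kx ∈ ks then some (kx, F kx) else none := by
  induction ks with
  | nil => simp
  | cons k ks ih =>
    by_cases h : k = kx
    · subst h
      simp [List.find?_cons_of_pos]
    · have hb : (k == kx) = true → False := by simp [h]
      rw [List.map_cons, List.find?_cons_of_neg (by simpa using hb), ih]
      have h2 : ¬ kx = k := fun e => h e.symm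
      simp [List.mem_cons, h2]

theorem pv_any_graph (ks : List String) (F : String → List Int) (kx : String) :
    (ks.map (fun k => (k, F k))).any (fun p => p.1 == kx) = decide (kx ∈ ks) := by
  induction ks with
  | nil => simp
  | cons k ks ih =>
    by_cases h : k = kx
    · simp [h]
    · have h2 : ¬ kx = k := fun e => h e.symm
      simp [h, h2, ih]

theorem pv_dedup_append (xs : List String) (y : String) :
    PySem.List.dedup (xs ++ [y])
      = if y ∈ PySem.List.dedup xs then PySem.List.dedup xs else PySem.List.dedup xs ++ [y] := by
  have h1 : ∀ (zs : List String), PySem.List.dedup zs = zs.foldl PySem.Set.add [] := by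
    intro zs
    rw [PySem.List.dedup_eq_ofList, PySem.Set.ofList_eq_foldl]
  rw [h1, h1, List.foldl_append, List.foldl_cons, List.foldl_nil]
  by_cases hm : y ∈ xs.foldl PySem.Set.add []
  · simp [PySem.Set.add, PySem.Set.contains, hm]
  · simp [PySem.Set.add, PySem.Set.contains, hm]

-- the group-by loop, characterized: items are the distinct keys in first order, each with all its values
theorem pv_items_groupFold {α : Type} (key : α → String) (val : α → Int) (l : List α) :
    (l.foldl (fun d x => d.insert (key x) (d.getD (key x) [] ++ [val x])) PySem.Dict.empty).items
      = (PySem.List.dedup (l.map key)).map (fun k => (k, (l.filter (fun x => key x == k)).map val)) := by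
  induction l using List.reverseRecOn with
  | nil => rfl
  | append_singleton l x ih =>
    rw [List.foldl_append, List.foldl_cons, List.foldl_nil]
    have hF : ∀ k, ((l ++ [x]).filter (fun y => key y == k)).map val
        = (l.filter (fun y => key y == k)).map val ++ (if key x == k then [val x] else []) := by
      intro k
      rw [List.filter_append, List.map_append]
      by_cases h : key x = k
      · simp [List.filter, h]
      · have hb : (key x == k) = false := by simp [h]
        simp [List.filter, hb]
    have hd := pv_dedup_append (l.map key) (key x)
    have hset : PySem.Dict.items (ν := List Int)
        (l.foldl (fun d x => d.insert (key x) (d.getD (key x) [] ++ [val x])) PySem.Dict.empty)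
        = (PySem.List.dedup (l.map key)).map
            (fun k => (k, (l.filter (fun x => key x == k)).map val)) := ih
    set D := l.foldl (fun d x => d.insert (key x) (d.getD (key x) [] ++ [val x])) PySem.Dict.empty with hD
    set ks := PySem.List.dedup (l.map key) with hks
    set F : String → List Int := fun k => (l.filter (fun x => key x == k)).map val with hFdef
    have hitems : D.items = ks.map (fun k => (k, F k)) := hset
    have hcont : D.contains (key x) = decide (key x ∈ ks) := by
      rw [PySem.Dict.contains, hitems, pv_any_graph]
    have hget : D.getD (key x) [] = if key x ∈ ks then F (key x) else [] := by
      rw [PySem.Dict.getD, PySem.Dict.get?, hitems, pv_find?_graph]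
      by_cases h : key x ∈ ks <;> simp [h]
    by_cases hm : key x ∈ l.map key
    · have hmk : key x ∈ ks := by rw [hks]; exact (PySem.List.mem_dedup _ _).mpr hm
      rw [List.map_append, List.map_cons, List.map_nil]
      rw [hd, if_pos hmk]
      rw [PySem.Dict.insert, hcont, decide_eq_true hmk, if_pos rfl, hget, if_pos hmk, hitems]
      simp only [PySem.Dict.items]
      rw [List.map_map, List.map_congr_left]
      intro k _
      simp only [Function.comp_apply]
      by_cases h : k = key x
      · subst h
        simp [hF, hFdef]
      · have hb : (k == key x) = false := by simp [h]
        have hb2 : (key x == k) = false := by rw [beq_eq_false_iff_ne]; exact fun e => h (Eq.symm e)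
        simp [hb, hF, hb2, hFdef]
    · have hmk : key x ∉ ks := fun h => hm ((PySem.List.mem_dedup _ _).mp (hks ▸ h))
      rw [List.map_append, List.map_cons, List.map_nil]
      rw [hd, if_neg hmk]
      rw [PySem.Dict.insert, hcont, decide_eq_false hmk]
      simp only [Bool.false_eq_true, if_false]
      rw [hget, if_neg hmk]
      simp only [PySem.Dict.items, hitems]
      rw [List.map_append, List.map_cons, List.map_nil]
      have hFx : (l.filter (fun y => key y == key x)).map val = [] := by
        have : l.filter (fun y => key y == key x) = [] := by
          rw [List.filter_eq_nil_iff]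
          intro y hy
          simp only [beq_iff_eq]
          exact fun e => hm (e ▸ List.mem_map_of_mem hy)
        simp [this]
      refine congrArg₂ (· ++ ·) ?_ ?_
      · rw [List.map_congr_left]
        intro k hk
        have hkm : k ∈ l.map key := (PySem.List.mem_dedup _ _).mp (hks ▸ hk)
        have hb : (key x == k) = false := by
          rw [beq_eq_false_iff_ne]
          exact fun e => hm (e ▸ hkm)
        simp [hF, hb, hFdef]
      · rw [hF (key x)]
        simp [hFx]

theorem pv_groupFold_getD {α : Type} (key : α → String) (val : α → Int) (l : List α) (k : String) :
    (l.foldl (fun d x => d.insert (key x) (d.getD (key x) [] ++ [val x])) PySem.Dict.empty).getD k []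
      = (l.filter (fun x => key x == k)).map val := by
  rw [PySem.Dict.getD, PySem.Dict.get?, pv_items_groupFold, pv_find?_graph]
  by_cases h : k ∈ PySem.List.dedup (l.map key)
  · rw [if_pos h]
    rfl
  · have h2 : l.filter (fun x => key x == k) = [] := by
      rw [List.filter_eq_nil_iff]
      intro y hy
      simp only [beq_iff_eq]
      exact fun e => h ((PySem.List.mem_dedup _ _).mpr (e ▸ List.mem_map_of_mem hy))
    rw [if_neg h, h2]
    rfl

-- one in-place update: insert on an existing key with distinct keys maps the matching entry
theorem pv_map_insert_entry (l : List (Int × List Int)) (t : Int) (v : List Int) (n : Int)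
    (hfind : l.find? (fun q => q.1 == t) = some (t, v)) (hk : (l.map (·.1)).Nodup) :
    l.map (fun p => if p.1 == t then (t, v ++ [n]) else p)
      = l.map (fun p => if p.1 == t then (p.1, p.2 ++ [n]) else p) := by
  induction l with
  | nil => rfl
  | cons q l ih =>
    rw [List.map_cons, List.nodup_cons] at hk
    by_cases hq : q.1 = t
    · have hqb : (q.1 == t) = true := by simp [hq]
      rw [List.find?_cons_of_pos (p := fun r : Int × List Int => r.1 == t) hqb] at hfind
      have hqv : q = (t, v) := Option.some.inj hfind
      subst hqv
      simp only [List.map_cons, hqb, if_true]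
      have hknot : t ∉ l.map (·.1) := by simpa using hk.1
      have htail : ∀ p ∈ l, ((p.1 : Int) == t) = false := by
        intro p hp
        rw [beq_eq_false_iff_ne]
        exact fun e => hknot (e ▸ List.mem_map_of_mem (f := (·.1)) hp)
      have h1 : l.map (fun p => if p.1 == t then (t, v ++ [n]) else p) = l := by
        rw [List.map_congr_left (g := id), List.map_id]
        intro p hp; simp [htail p hp]
      have h2 : l.map (fun p => if p.1 == t then (p.1, p.2 ++ [n]) else p) = l := by
        rw [List.map_congr_left (g := id), List.map_id]
        intro p hp; simp [htail p hp]
      rw [h1, h2]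
    · have hqb : (q.1 == t) = false := by rw [beq_eq_false_iff_ne]; exact hq
      rw [List.find?_cons_of_neg (p := fun r : Int × List Int => r.1 == t) (by simp [hqb])] at hfind
      simp only [List.map_cons, hqb, Bool.false_eq_true, if_false]
      rw [ih hfind hk.2]

theorem pv_insert_update (d : PySem.Dict Int (List Int)) (t n : Int)
    (hc : d.contains t = true) (hk : (d.items.map (·.1)).Nodup) :
    (d.insert t (d.getD t [] ++ [n])).items
      = d.items.map (fun p => if p.1 == t then (p.1, p.2 ++ [n]) else p) := by
  obtain ⟨p0, hp0⟩ : ∃ p0, d.items.find? (fun q => q.1 == t) = some p0 := by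
    obtain ⟨p, hp, hpt⟩ := List.any_eq_true.mp hc
    exact Option.isSome_iff_exists.mp (List.find?_isSome.mpr ⟨p, hp, hpt⟩)
  have hpt : p0.1 = t := by simpa using List.find?_some hp0
  obtain ⟨k0, v⟩ := p0
  subst hpt
  simp only [PySem.Dict.insert, PySem.Dict.contains] at hc ⊢
  rw [hc, if_pos rfl]
  simp only [PySem.Dict.getD, PySem.Dict.get?, hp0, Option.map_some, Option.getD_some]
  exact pv_map_insert_entry d.items _ v n hp0 hk

-- row membership: t is a caption index with prefix k
theorem pv_mem_pvRow (C : List String) (k : String) (t : Int) (ht : t ∈ pvRow C k) :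
    ∃ (j : Nat) (h : j < C.length), t = (j : Int) ∧ pvPrefix C[j] = k := by
  simp only [pvRow, List.mem_map, List.mem_filter] at ht
  obtain ⟨p, ⟨hp, hpk⟩, rfl⟩ := ht
  obtain ⟨j, hj, rfl⟩ := (PySem.List.mem_enumerate_iff _ _ _).mp hp
  exact ⟨j, hj, by simp, by simpa using hpk⟩

theorem pv_pvRow_disjoint (C : List String) (k k' : String) (t : Int)
    (h : t ∈ pvRow C k) (h' : t ∈ pvRow C k') : k = k' := by
  obtain ⟨j, hj, he, hk⟩ := pv_mem_pvRow C k t h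
  obtain ⟨j', hj', he', hk'⟩ := pv_mem_pvRow C k' t h'
  have hjj : j = j' := by exact_mod_cast he.symm.trans he'
  subst hjj
  rw [← hk, ← hk']

theorem pv_pvRow_nodup (C : List String) (k : String) : (pvRow C k).Nodup := by
  have h : ((PySem.List.enumerate C).filter (fun p => pvPrefix p.2 == k)).Pairwise
      (fun p q => p.1 < q.1) :=
    List.Pairwise.sublist List.filter_sublist (PySem.List.pairwise_lt_enumerate _ _)
  exact List.pairwise_map.mpr (h.imp (fun hlt => ne_of_lt hlt))

theorem pv_pvCol_append (V : List String) (v k : String) :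
    pvCol (V ++ [v]) k = pvCol V k ++ (if v == k then [(V.length : Int)] else []) := by
  unfold pvCol
  rw [PySem.List.enumerate_append, List.filter_append, List.map_append]
  congr 1
  by_cases h : v = k
  · simp [PySem.List.enumerate_cons, List.filter, h]
  · have hb : (v == k) = false := by rw [beq_eq_false_iff_ne]; exact h
    simp [PySem.List.enumerate_cons, List.filter, hb]

theorem pv_pvCol_nil (V : List String) (v : String) (h : v ∉ V) : pvCol V v = [] := by
  unfold pvCol
  rw [List.filter_eq_nil_iff.mpr, List.map_nil]
  intro q hq
  obtain ⟨j, hj, rfl⟩ := (PySem.List.mem_enumerate_iff _ _ _).mp hq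
  simp only [beq_iff_eq]
  exact fun e => h (e ▸ List.getElem_mem hj)

-- a run of inserts on fresh keys appends the new entries (value = old [] + [n])
theorem pv_items_fresh_getD (ts : List Int) (n : Int) (d : PySem.Dict Int (List Int))
    (hnd : ts.Nodup) (hf : ∀ t ∈ ts, d.contains t = false) :
    (ts.foldl (fun d t => d.insert t (d.getD t [] ++ [n])) d).items
      = d.items ++ ts.map (fun t => (t, ([n] : List Int))) := by
  induction ts generalizing d with
  | nil => simp
  | cons t ts ih =>
    rw [List.foldl_cons]
    have hct : d.contains t = false := hf t (by simp)
    have hfind := pv_find?_none d t hct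
    have hstep : (d.insert t (d.getD t [] ++ [n])) = ⟨d.items ++ [(t, [n])]⟩ := by
      simp only [PySem.Dict.insert, hct, Bool.false_eq_true, if_false, PySem.Dict.getD,
        PySem.Dict.get?, hfind, Option.map_none, Option.getD_none, List.nil_append]
    have hf' : ∀ t' ∈ ts,
        (PySem.Dict.mk (d.items ++ [(t, ([n] : List Int))]) : PySem.Dict Int (List Int)).contains t' = false := by
      intro t' ht'
      have h1 : d.contains t' = false := hf t' (List.mem_cons_of_mem _ ht')
      have h2 : (t == t') = false := by
        rw [beq_eq_false_iff_ne]
        exact fun e => (List.nodup_cons.mp hnd).1 (e ▸ ht')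
      simp only [PySem.Dict.contains] at h1 ⊢
      simp [h1, h2]
    rw [hstep, ih _ (List.nodup_cons.mp hnd).2 hf', List.map_cons]
    simp [List.append_assoc]

-- a run of inserts on fresh keys with a constant value appends the new entries
theorem pv_items_fresh_const (ts : List Int) (w : List Int) (d : PySem.Dict Int (List Int))
    (hnd : ts.Nodup) (hf : ∀ t ∈ ts, d.contains t = false) :
    (ts.foldl (fun d t => d.insert t w) d).items = d.items ++ ts.map (fun t => (t, w)) := by
  induction ts generalizing d with
  | nil => simp
  | cons t ts ih =>
    rw [List.foldl_cons]
    have hct : d.contains t = false := hf t (by simp)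
    have hstep : (d.insert t w) = ⟨d.items ++ [(t, w)]⟩ := by
      simp only [PySem.Dict.insert, hct, Bool.false_eq_true, if_false]
    have hf' : ∀ t' ∈ ts,
        (PySem.Dict.mk (d.items ++ [(t, w)]) : PySem.Dict Int (List Int)).contains t' = false := by
      intro t' ht'
      have h1 : d.contains t' = false := hf t' (List.mem_cons_of_mem _ ht')
      have h2 : (t == t') = false := by
        rw [beq_eq_false_iff_ne]
        exact fun e => (List.nodup_cons.mp hnd).1 (e ▸ ht')
      simp only [PySem.Dict.contains] at h1 ⊢
      simp [h1, h2]
    rw [hstep, ih _ (List.nodup_cons.mp hnd).2 hf', List.map_cons]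
    simp [List.append_assoc]

-- a run of appends on existing keys updates the matching entries in place
theorem pv_items_update_fold (ts : List Int) (n : Int) (d : PySem.Dict Int (List Int))
    (hnd : ts.Nodup) (hk : (d.items.map (·.1)).Nodup) (hc : ∀ t ∈ ts, d.contains t = true) :
    (ts.foldl (fun d t => d.insert t (d.getD t [] ++ [n])) d).items
      = d.items.map (fun p => if p.1 ∈ ts then (p.1, p.2 ++ [n]) else p) := by
  induction ts generalizing d with
  | nil => simp
  | cons t ts ih =>
    rw [List.foldl_cons]
    have h1 := pv_insert_update d t n (hc t (by simp)) hk
    have hfst : (d.insert t (d.getD t [] ++ [n])).items.map (·.1) = d.items.map (·.1) := by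
      rw [h1, List.map_map]
      apply List.map_congr_left
      intro p _
      by_cases hpt : p.1 = t
      · simp [hpt]
      · have hb : (p.1 == t) = false := by rw [beq_eq_false_iff_ne]; exact hpt
        simp [hb, hpt]
    have hk' : ((d.insert t (d.getD t [] ++ [n])).items.map (·.1)).Nodup := by
      rw [hfst]; exact hk
    have hc' : ∀ t' ∈ ts, (d.insert t (d.getD t [] ++ [n])).contains t' = true := by
      intro t' ht'
      have := hc t' (List.mem_cons_of_mem _ ht')
      simp only [PySem.Dict.contains, List.any_eq_true] at this ⊢
      obtain ⟨p, hp, hpt⟩ := this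
      have : p.1 ∈ (d.insert t (d.getD t [] ++ [n])).items.map (·.1) := by
        rw [hfst]; exact List.mem_map_of_mem hp
      obtain ⟨q, hq, hqe⟩ := List.mem_map.mp this
      exact ⟨q, hq, by rw [hqe]; exact hpt⟩
    rw [ih _ (List.nodup_cons.mp hnd).2 hk' hc', h1, List.map_map]
    apply List.map_congr_left
    intro p _
    have htn : t ∉ ts := (List.nodup_cons.mp hnd).1
    by_cases hpt : p.1 = t
    · have hb : (p.1 == t) = true := by simp [hpt]
      simp only [Function.comp_apply, hb, if_true]
      rw [if_neg (by simpa [hpt] using htn), if_pos (by simp [hpt])]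
    · have hb : (p.1 == t) = false := by rw [beq_eq_false_iff_ne]; exact hpt
      simp only [Function.comp_apply, hb, Bool.false_eq_true, if_false]
      by_cases hin : p.1 ∈ ts
      · rw [if_pos hin, if_pos (List.mem_cons_of_mem _ hin)]
      · rw [if_neg hin, if_neg (by simp [hpt, hin])]

-- B's t2v loop: all inserted keys are fresh, so items are the concatenated groups
theorem pv_B_nested (C : List String) (ks : List String) (w : String → List Int) (hks : ks.Nodup) :
    (ks.foldl (fun d k => (pvRow C k).foldl (fun d t => d.insert t (w k)) d) PySem.Dict.empty).items
      = ks.flatMap (fun k => (pvRow C k).map (fun t => (t, w k))) := by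
  induction ks using List.reverseRecOn with
  | nil => rfl
  | append_singleton ks v ih =>
    obtain ⟨h1, -, h3⟩ := List.nodup_append.mp hks
    have hv : v ∉ ks := fun hm => h3 v hm v (by simp) rfl
    rw [List.foldl_append, List.foldl_cons, List.foldl_nil]
    have hitems := ih h1
    have hfresh : ∀ t ∈ pvRow C v,
        (ks.foldl (fun d k => (pvRow C k).foldl (fun d t => d.insert t (w k)) d)
          PySem.Dict.empty).contains t = false := by
      intro t ht
      rw [← Bool.not_eq_true, PySem.Dict.contains, List.any_eq_true]
      rintro ⟨p, hp, hpt⟩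
      rw [hitems, List.mem_flatMap] at hp
      obtain ⟨k, hk, hpk⟩ := hp
      obtain ⟨t', ht', rfl⟩ := List.mem_map.mp hpk
      have : t' = t := by simpa using hpt
      subst this
      exact hv (pv_pvRow_disjoint C v k t' ht ht' ▸ hk)
    rw [pv_items_fresh_const _ _ _ (pv_pvRow_nodup C v) hfresh, hitems, List.flatMap_append]
    simp

-- A's t2v loop over the rows: the grouped characterization
theorem pv_A_t2v (C V : List String) :
    ((PySem.List.enumerate (V.map (pvRow C))).foldl
       (fun d q => q.2.foldl (fun d t => d.insert t (d.getD t [] ++ [q.1])) d) PySem.Dict.empty).items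
      = (PySem.List.dedup V).flatMap (fun k => (pvRow C k).map (fun t => (t, pvCol V k))) := by
  induction V using List.reverseRecOn with
  | nil => rfl
  | append_singleton V v ih =>
    rw [List.map_append, List.map_cons, List.map_nil, PySem.List.enumerate_append,
      List.foldl_append, PySem.List.enumerate_cons, PySem.List.enumerate_nil,
      List.foldl_cons, List.foldl_nil]
    simp only [List.length_map, zero_add]
    set D := (PySem.List.enumerate (V.map (pvRow C))).foldl
       (fun d q => q.2.foldl (fun d t => d.insert t (d.getD t [] ++ [q.1])) d) PySem.Dict.empty
      with hD
    have hitems : D.items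
        = (PySem.List.dedup V).flatMap (fun k => (pvRow C k).map (fun t => (t, pvCol V k))) := ih
    have hcontD : ∀ t, D.contains t = true ↔ ∃ k, k ∈ PySem.List.dedup V ∧ t ∈ pvRow C k := by
      intro t
      simp only [PySem.Dict.contains, List.any_eq_true, hitems, List.mem_flatMap, List.mem_map]
      constructor
      · rintro ⟨p, ⟨k, hk, t', ht', rfl⟩, hpt⟩
        have : t' = t := by simpa using hpt
        exact ⟨k, hk, this ▸ ht'⟩
      · rintro ⟨k, hk, ht⟩
        exact ⟨(t, pvCol V k), ⟨k, hk, t, ht, rfl⟩, by simp⟩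
    by_cases hv : v ∈ V
    · have hdd : PySem.List.dedup (V ++ [v]) = PySem.List.dedup V := by
        rw [pv_dedup_append, if_pos ((PySem.List.mem_dedup _ _).mpr hv)]
      have hkeys : (D.items.map (·.1)).Nodup := by
        rw [hitems]
        have hkm : ((PySem.List.dedup V).flatMap
              (fun k => (pvRow C k).map (fun t => (t, pvCol V k)))).map (·.1)
            = (PySem.List.dedup V).flatMap (fun k => pvRow C k) := by
          rw [List.map_flatMap]
          apply List.flatMap_congr
          intro k _
          rw [List.map_map]
          simp [Function.comp_def]
        rw [hkm, List.nodup_flatMap]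
        refine ⟨fun k _ => pv_pvRow_nodup C k, ?_⟩
        refine (PySem.List.nodup_dedup V).imp ?_
        intro a b hab
        intro t hta htb
        exact hab (pv_pvRow_disjoint C a b t hta htb)
      have hts : ∀ t ∈ pvRow C v, D.contains t = true := fun t ht =>
        (hcontD t).mpr ⟨v, (PySem.List.mem_dedup _ _).mpr hv, ht⟩
      rw [pv_items_update_fold _ _ _ (pv_pvRow_nodup C v) hkeys hts, hitems, hdd,
        List.map_flatMap]
      apply List.flatMap_congr
      intro k hk
      rw [List.map_map]
      apply List.map_congr_left
      intro t ht
      simp only [Function.comp_apply]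
      by_cases hkv : k = v
      · subst hkv
        rw [if_pos ht, pv_pvCol_append, if_pos (by simp)]
      · have hnt : t ∉ pvRow C v := fun h => hkv (pv_pvRow_disjoint C k v t ht h)
        rw [if_neg hnt, pv_pvCol_append, if_neg (by simp only [beq_iff_eq]; exact fun e => hkv (Eq.symm e))]
        simp
    · have hdd : PySem.List.dedup (V ++ [v]) = PySem.List.dedup V ++ [v] := by
        rw [pv_dedup_append,
          if_neg (fun h => hv ((PySem.List.mem_dedup _ _).mp h))]
      have hfresh : ∀ t ∈ pvRow C v, D.contains t = false := by
        intro t ht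
        rw [← Bool.not_eq_true]
        intro hc
        obtain ⟨k, hk, htk⟩ := (hcontD t).mp hc
        exact hv ((PySem.List.mem_dedup _ _).mp (pv_pvRow_disjoint C v k t ht htk ▸ hk))
      rw [pv_items_fresh_getD _ _ _ (pv_pvRow_nodup C v) hfresh, hitems, hdd,
        List.flatMap_append]
      congr 1
      · apply List.flatMap_congr
        intro k hk
        apply List.map_congr_left
        intro t _
        rw [pv_pvCol_append, if_neg (by
          simp only [beq_iff_eq]
          exact fun e => hv (by rw [e]; exact (PySem.List.mem_dedup _ _).mp hk))]
        simp
      · rw [List.flatMap_cons, List.flatMap_nil, List.append_nil]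
        apply List.map_congr_left
        intro t _
        rw [pv_pvCol_append, if_pos (by simp), pv_pvCol_nil V v hv]
        simp

-- A's v2t loop: each row is the filtered caption list
theorem pv_A_v2t (V C : List String) :
    (V.foldl (fun v2t vid => v2t ++ [(PySem.List.enumerate C).foldl
      (fun row p => if pvPrefix p.2 == vid then row ++ [p.1] else row) []]) ([] : List (List Int)))
    = V.map (pvRow C) := by
  rw [PySem.List.foldl_append_singleton_eq_map, List.nil_append]
  apply List.map_congr_left
  intro vid _
  rw [PySem.List.foldl_append_if, List.nil_append]
  rfl

-- ===== VERDICT (by name: the statement is the Claim_ definition above) =====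
theorem get_gt_spec : Claim_equal_get_gt := by
  unfold Claim_equal_get_gt
  intro V C _
  simp only [Spec_get_gt, get_gt, get_gt_alt]
  -- normalize the three setdefault/modify group loops to plain inserts
  have hidx : (fun (d : PySem.Dict String (List Int)) (q : Int × String) =>
      (PySem.Dict.setdefault d q.2 []).modify q.2 [] (fun l => l ++ [q.1]))
      = fun d q => d.insert q.2 (d.getD q.2 [] ++ [q.1]) := by
    funext d q
    exact pv_setdefault_modify d q.2 [] (fun l => l ++ [q.1])
  have hcap : (fun (d : PySem.Dict String (List Int)) (q : Int × String) =>
      (PySem.Dict.setdefault d (pvPrefix q.2) []).modify (pvPrefix q.2) [] (fun l => l ++ [q.1]))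
      = fun d q => d.insert (pvPrefix q.2) (d.getD (pvPrefix q.2) [] ++ [q.1]) := by
    funext d q
    exact pv_setdefault_modify d (pvPrefix q.2) [] (fun l => l ++ [q.1])
  have hA2 : (fun (d : PySem.Dict Int (List Int)) (q : Int × List Int) =>
      q.2.foldl (fun d t => (PySem.Dict.setdefault d t []).modify t [] (fun l => l ++ [q.1])) d)
      = fun d q => q.2.foldl (fun d t => d.insert t (d.getD t [] ++ [q.1])) d := by
    funext d q
    congr 1
    funext d t
    exact pv_setdefault_modify d t [] (fun l => l ++ [q.1])
  rw [hidx, hcap, hA2, pv_A_v2t]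
  -- B's v2t equals A's v2t
  have hv2tB : V.map (fun vid =>
      ((PySem.List.enumerate C).foldl
        (fun d q => d.insert (pvPrefix q.2) (d.getD (pvPrefix q.2) [] ++ [q.1]))
        PySem.Dict.empty).getD vid []) = V.map (pvRow C) := by
    apply List.map_congr_left
    intro vid _
    rw [pv_groupFold_getD (fun q => pvPrefix q.2) (fun q => q.1) (PySem.List.enumerate C) vid]
    rfl
  rw [hv2tB]
  -- index.items is the grouped video list
  have hidxitems : ((PySem.List.enumerate V).foldl
      (fun d q => d.insert q.2 (d.getD q.2 [] ++ [q.1])) PySem.Dict.empty).items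
      = (PySem.List.dedup V).map (fun k => (k, pvCol V k)) := by
    rw [pv_items_groupFold (fun q => q.2) (fun q => q.1) (PySem.List.enumerate V),
      PySem.List.map_snd_enumerate]
    rfl
  rw [hidxitems]
  congr 1
  -- the two t2v dicts have the same items
  rw [pv_A_t2v, List.foldl_map]
  have hstep : (fun (d : PySem.Dict Int (List Int)) (k : String) =>
      (((PySem.List.enumerate C).foldl
        (fun d q => d.insert (pvPrefix q.2) (d.getD (pvPrefix q.2) [] ++ [q.1]))
        PySem.Dict.empty).getD (k, pvCol V k).1 []).foldl
          (fun d t => d.insert t (k, pvCol V k).2) d)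
      = fun d k => (pvRow C k).foldl (fun d t => d.insert t (pvCol V k)) d := by
    funext d k
    rw [pv_groupFold_getD (fun q => pvPrefix q.2) (fun q => q.1) (PySem.List.enumerate C)]
    rfl
  rw [hstep, pv_B_nested C (PySem.List.dedup V) (pvCol V) (PySem.List.nodup_dedup V)]
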